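-- pv_equiv track=rewrite | github.com/BenjiDayan/national_cipher_challenge | columnar.py | standard_split
-- ===== SOURCE A (Python) =====
-- def standard_split(text, row_length):
--     """text = abcdefghijklmnopqrstuvwxyz and row_length = 5
--     abcde
--     fghij
--     klmno
--     pqrst
--     uvwxy
--     z      returns ['afkpuz', 'bglqv', 'chmrw', 'dinsx', 'ejoty']
--     """
--     output = []
--     text_length = len(text)
--     # Takes output column by index in turn, taking e.g. the 0th, 5th, 10th ... char
--     # for the 0th column, then the 1st, 6th, 11th ... char for the 1st column etc.
--     for num in range(row_length):
--         count = num
--         output.append([])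
--         while count < text_length:
--             output[-1].append(text[count])
--             count += row_length
--
--     return(output)
-- ===== SOURCE B (Python) =====
-- def standard_split(text, row_length):
--     if row_length <= 0:
--         return []
--     output = [[] for _ in range(row_length)]
--     for i, ch in enumerate(text):
--         output[i % row_length].append(ch)
--     return output
-- ===== Notes on version B (the rewrite author's own statement) =====
-- stated objective: idiomatic
-- what changed: Replaces A's per-column strided while-loops (one pass over the text per column) with a single enumerate pass distributing each character round-robin into pre-built column buckets via i % row_length.
import Mathlib
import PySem

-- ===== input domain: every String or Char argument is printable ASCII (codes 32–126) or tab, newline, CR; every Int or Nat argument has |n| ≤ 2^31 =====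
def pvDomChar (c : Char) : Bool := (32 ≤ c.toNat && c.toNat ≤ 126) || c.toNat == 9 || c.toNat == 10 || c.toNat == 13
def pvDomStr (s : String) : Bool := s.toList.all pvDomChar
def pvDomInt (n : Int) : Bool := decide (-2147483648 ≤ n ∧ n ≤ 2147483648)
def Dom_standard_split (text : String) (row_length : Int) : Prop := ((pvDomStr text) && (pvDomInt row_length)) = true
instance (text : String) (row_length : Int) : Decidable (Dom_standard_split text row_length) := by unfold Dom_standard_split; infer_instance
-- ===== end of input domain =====

-- B replaces A's per-column strided inner loops by a single round-robin pass over the text (idiomatic, same cost).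

-- ===== PORT A =====
-- inner 'while count < text_length: output[-1].append(text[count]); count += row_length'
-- (the extra '0 < rl' guard only ensures totality: A's for-loop never runs the while with rl ≤ 0)
def pvAWhile (cs : List Char) (tl rl count : Int) : List String :=
  if _h : count < tl ∧ 0 < rl then
    (match PySem.List.pyGet? cs count with
     | some c => [String.ofList [c]]
     | none => []) ++ pvAWhile cs tl rl (count + rl)
  else []
termination_by (tl - count).toNat
decreasing_by omega

def standard_split (text : String) (row_length : Int) : List (List String) :=
  (PySem.List.pyRange 0 row_length 1).map
    (fun num => pvAWhile text.toList (text.toList.length : Int) row_length num)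

-- ===== PORT B =====
def standard_split_alt (text : String) (row_length : Int) : List (List String) :=
  if row_length ≤ 0 then []
  else
    (PySem.List.enumerate text.toList 0).foldl
      (fun out p =>
        out.modify (PySem.Int.mod p.1 row_length).toNat (fun col => col ++ [String.ofList [p.2]]))
      ((PySem.List.pyRange 0 row_length 1).map (fun _ => []))

-- ===== PRECONDITION & SPEC =====
def Spec_standard_split (text : String) (row_length : Int) (out : List (List String)) : Prop := out = standard_split_alt text row_length
instance (text : String) (row_length : Int) (out : List (List String)) : Decidable (Spec_standard_split text row_length out) := by unfold Spec_standard_split; infer_instance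

-- ===== CLAIM (what is proved, stated in full; the proofs are below) =====
def Claim_equal_standard_split : Prop := ∀ (text : String) (row_length : Int), Dom_standard_split text row_length → Spec_standard_split text row_length (standard_split text row_length)

-- ===== LEMMAS AND PROOFS =====

lemma pvAWhile_stop (cs : List Char) (tl rl count : Int) (h : tl ≤ count) :
    pvAWhile cs tl rl count = [] := by
  rw [pvAWhile]; simp; omega

lemma pvEnumerate_snoc (xs : List Char) (c : Char) (s : Int) :
    PySem.List.enumerate (xs ++ [c]) s
      = PySem.List.enumerate xs s ++ [(s + xs.length, c)] := by
  induction xs generalizing s with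
  | nil => simp [PySem.List.enumerate_cons, PySem.List.enumerate_nil]
  | cons x xs ih =>
      simp [PySem.List.enumerate_cons, ih]
      ring_nf

lemma pvMod_pos (a b : Int) (hb : 0 < b) : PySem.Int.mod a b = a % b := by
  unfold PySem.Int.mod
  simp [Int.fmod_eq_emod, hb.le]

-- a % rl = b % rl is impossible when b < a < b + rl (0 < rl)
lemma pvMod_ne (a b rl : Int) (_hrl : 0 < rl) (h1 : b < a) (h2 : a < b + rl) :
    a % rl ≠ b % rl := by
  intro h
  have h0 : (a - b) % rl = 0 := Int.emod_eq_emod_iff_emod_sub_eq_zero.mp h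
  have h1' : (a - b) % rl = a - b := Int.emod_eq_of_lt (by omega) (by omega)
  omega

-- L % rl ≠ count when 0 ≤ L < count < rl
lemma pvMod_ne' (L count rl : Int) (hrl : 0 < rl) (h0 : 0 ≤ L) (h1 : L < count) (h2 : count < rl) :
    L % rl ≠ count % rl := by
  have hc : count % rl = count := Int.emod_eq_of_lt (by omega) h2
  by_cases hL : L < rl
  · rw [hc, Int.emod_eq_of_lt h0 hL]; omega
  · have := Int.emod_lt_of_pos L hrl
    omega

lemma pvAWhile_snoc (cs : List Char) (c : Char) (rl : Int) (hrl : 0 < rl) :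
    ∀ (d : Nat) (count : Int), (((cs.length : Int) - count).toNat = d) →
      0 ≤ count →
      (count ≤ (cs.length : Int) ∨ PySem.Int.mod (cs.length : Int) rl ≠ PySem.Int.mod count rl) →
      pvAWhile (cs ++ [c]) ((cs.length : Int) + 1) rl count
        = pvAWhile cs (cs.length : Int) rl count ++
          (if PySem.Int.mod (cs.length : Int) rl = PySem.Int.mod count rl
           then [String.ofList [c]] else []) := by
  intro d
  induction d using Nat.strong_induction_on with
  | _ d ih =>
    intro count hd h0 hor
    rcases lt_trichotomy count (cs.length : Int) with hlt | heq | hgt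
    · -- count < length: both loops consume cs[count] and step by rl
      conv_lhs => rw [pvAWhile]
      conv_rhs => rw [pvAWhile]
      rw [dif_pos ⟨by omega, hrl⟩, dif_pos ⟨hlt, hrl⟩]
      have hlen : count < ((cs ++ [c]).length : Int) := by simp; omega
      have hget : PySem.List.pyGet? cs count = some cs[count.toNat] :=
        PySem.List.pyGet?_eq_some_getElem _ h0 hlt
      have hget2 : PySem.List.pyGet? (cs ++ [c]) count = some cs[count.toNat] := by
        rw [PySem.List.pyGet?_eq_some_getElem _ h0 hlen]
        congr 1
        exact List.getElem_append_left (by omega)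
      rw [hget, hget2]
      have hmod : PySem.Int.mod (count + rl) rl = PySem.Int.mod count rl := by
        rw [pvMod_pos _ _ hrl, pvMod_pos _ _ hrl, Int.add_emod_right]
      have hdisj : count + rl ≤ (cs.length : Int) ∨
          PySem.Int.mod (cs.length : Int) rl ≠ PySem.Int.mod (count + rl) rl := by
        by_cases hle : count + rl ≤ (cs.length : Int)
        · exact Or.inl hle
        · refine Or.inr ?_
          rw [hmod, pvMod_pos _ _ hrl, pvMod_pos _ _ hrl]
          exact pvMod_ne _ _ _ hrl hlt (by omega)
      rw [ih (((cs.length : Int) - (count + rl)).toNat) (by omega) (count + rl) rfl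
            (by omega) hdisj, hmod]
      simp
    · -- count = length: the new loop consumes exactly the appended char
      subst heq
      rw [pvAWhile, dif_pos ⟨by omega, hrl⟩, PySem.List.pyGet?_append_length,
          pvAWhile_stop _ _ _ _ (by omega), pvAWhile_stop _ _ _ _ le_rfl, if_pos rfl]
      simp
    · -- count past the end: both loops are done, and the column cannot match
      have hne : PySem.Int.mod (cs.length : Int) rl ≠ PySem.Int.mod count rl :=
        hor.resolve_left (by omega)
      rw [pvAWhile_stop _ _ _ _ (by omega), pvAWhile_stop _ _ _ _ (by omega), if_neg hne]
      rfl

lemma pvModify_map {α : Type} (l : List Int) (g : Int → α) (f : α → α) (j : Nat)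
    (hj : j < l.length) (hnd : l.Nodup) :
    (l.map g).modify j f = l.map (fun x => if x = l[j] then f (g x) else g x) := by
  apply List.ext_getElem (by simp)
  intro i h1 h2
  simp only [List.getElem_modify, List.getElem_map] at *
  by_cases hij : j = i
  · subst hij; simp
  · simp only [if_neg hij]
    rw [if_neg]
    exact fun he => hij (hnd.getElem_inj_iff.mp he).symm

lemma pvMain (rl : Int) (hrl : 0 < rl) (cs : List Char) :
    (PySem.List.enumerate cs 0).foldl
      (fun out p =>
        out.modify (PySem.Int.mod p.1 rl).toNat (fun col => col ++ [String.ofList [p.2]]))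
      ((PySem.List.pyRange 0 rl 1).map (fun _ => []))
    = (PySem.List.pyRange 0 rl 1).map (fun num => pvAWhile cs (cs.length : Int) rl num) := by
  induction cs using List.reverseRecOn with
  | nil =>
      rw [PySem.List.enumerate_nil]
      simp only [List.foldl_nil, List.length_nil, Int.natCast_zero]
      apply List.map_congr_left
      intro num hnum
      rw [pvAWhile_stop _ _ _ _ ((PySem.List.mem_pyRange_one.mp hnum).1)]
  | append_singleton cs c ih =>
      rw [pvEnumerate_snoc, List.foldl_append, ih]
      have hmodnn : 0 ≤ PySem.Int.mod (cs.length : Int) rl := by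
        rw [pvMod_pos _ _ hrl]; exact Int.emod_nonneg _ (by omega)
      have hmodlt : PySem.Int.mod (cs.length : Int) rl < rl := by
        rw [pvMod_pos _ _ hrl]; exact Int.emod_lt_of_pos _ hrl
      have hj : (PySem.Int.mod (cs.length : Int) rl).toNat <
          (PySem.List.pyRange 0 rl 1).length := by
        rw [PySem.List.length_pyRange_one]
        omega
      rw [List.foldl_cons, List.foldl_nil]
      simp only [zero_add]
      rw [pvModify_map _ _ _ _ hj (PySem.List.nodup_pyRange_one 0 rl)]
      apply List.map_congr_left
      intro num hnum
      obtain ⟨hn0, hnr⟩ := PySem.List.mem_pyRange_one.mp hnum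
      have hidx : (PySem.List.pyRange 0 rl 1)[(PySem.Int.mod (cs.length : Int) rl).toNat]
          = PySem.Int.mod (cs.length : Int) rl := by
        rw [PySem.List.getElem_pyRange_one]
        omega
      have hmodnum : PySem.Int.mod num rl = num := by
        rw [pvMod_pos _ _ hrl]
        exact Int.emod_eq_of_lt hn0 hnr
      have hdisj : num ≤ (cs.length : Int) ∨
          PySem.Int.mod (cs.length : Int) rl ≠ PySem.Int.mod num rl := by
        by_cases hle : num ≤ (cs.length : Int)
        · exact Or.inl hle
        · refine Or.inr ?_
          have hnum' : num % rl = num := Int.emod_eq_of_lt hn0 hnr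
          rw [hmodnum, pvMod_pos _ _ hrl, ← hnum']
          exact pvMod_ne' _ _ _ hrl (by omega) (by omega) hnr
      have hsnoc := pvAWhile_snoc cs c rl hrl (((cs.length : Int) - num).toNat) num rfl hn0 hdisj
      have hlen : (((cs ++ [c]).length : Int)) = (cs.length : Int) + 1 := by simp
      rw [hlen, hsnoc, hidx]
      by_cases hcase : num = PySem.Int.mod (cs.length : Int) rl
      · rw [if_pos hcase, if_pos (by rw [hmodnum, hcase])]
      · rw [if_neg hcase, if_neg (by rw [hmodnum]; exact fun h => hcase h.symm)]
        simp

theorem pv_equal (text : String) (rl : Int) :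
    standard_split text rl = standard_split_alt text rl := by
  unfold standard_split standard_split_alt
  by_cases h : rl ≤ 0
  · simp [h, PySem.List.pyRange_one_eq_nil h]
  · rw [if_neg h]
    exact (pvMain rl (by omega) text.toList).symm

-- ===== VERDICT (by name: the statement is the Claim_ definition above) =====
theorem standard_split_spec : Claim_equal_standard_split := by
  intro text rl _
  unfold Spec_standard_split
  exact pv_equal text rl
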